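-- pv_equiv track=rewrite | github.com/millidavids/dailyprogrammer | c131easy.py | reverse_check
-- ===== SOURCE A (Python) =====
-- def reverse_check(forward, reverse):
--     """
--     Check if the reverse parameter is the same as the reverse of the forward parameter.
--     """
--     newword = ''
--     for x in forward:
--         newword = x + newword
--     if reverse == newword:
--         result = 'Good test data'
--     else:
--         result = 'Mismatch! Bad test data'
--     return result
-- ===== SOURCE B (Python) =====
-- def reverse_check(forward, reverse):
--     n = len(forward)
--     if len(reverse) != n:
--         return 'Mismatch! Bad test data'
--     for i in range(n):
--         if forward[i] != reverse[n - 1 - i]: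
--             return 'Mismatch! Bad test data'
--     return 'Good test data'
-- ===== Notes on version B (the rewrite author's own statement) =====
-- stated objective: faster
-- what changed: Replaces A's construction of a reversed copy by repeated front-concatenation (quadratic string building) with a length guard plus an index-only two-pointer comparison that allocates nothing and stops at the first mismatch.
import Mathlib
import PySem

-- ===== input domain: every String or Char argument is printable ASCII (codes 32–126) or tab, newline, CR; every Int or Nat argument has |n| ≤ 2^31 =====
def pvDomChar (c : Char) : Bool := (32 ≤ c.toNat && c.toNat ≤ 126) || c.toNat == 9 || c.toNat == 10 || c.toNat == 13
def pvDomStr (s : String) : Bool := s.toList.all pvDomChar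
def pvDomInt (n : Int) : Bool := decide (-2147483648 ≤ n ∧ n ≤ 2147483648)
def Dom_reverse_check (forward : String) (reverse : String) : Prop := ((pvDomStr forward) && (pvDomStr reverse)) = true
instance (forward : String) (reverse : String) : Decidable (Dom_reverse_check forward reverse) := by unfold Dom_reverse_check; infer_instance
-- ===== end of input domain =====

-- B replaces A's quadratic reversed-copy construction with a length guard and an
-- index-only two-pointer comparison (alternative decomposition; no reversed string built).

-- ===== PORT A =====
-- 'for x in forward: newword = x + newword' : prepend each character to the accumulator
def revAccA : List Char → List Char → List Char
  | [], acc => acc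
  | c :: cs, acc => revAccA cs (c :: acc)

def reverse_check (forward : String) (reverse : String) : String :=
  let newword := revAccA forward.toList []
  if reverse.toList = newword then "Good test data" else "Mismatch! Bad test data"

-- ===== PORT B =====
-- 'for i in range(n): if forward[i] != reverse[n-1-i]: return mismatch' (early return)
def loopB (f r : List Char) (n i : Nat) : String :=
  if i < n then
    if f.getD i ' ' ≠ r.getD (n - 1 - i) ' ' then "Mismatch! Bad test data"
    else loopB f r n (i + 1)
  else "Good test data"
termination_by n - i

def reverse_check_alt (forward : String) (reverse : String) : String :=
  let f := forward.toList
  let r := reverse.toList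
  let n := f.length
  if r.length ≠ n then "Mismatch! Bad test data"
  else loopB f r n 0

-- ===== PRECONDITION & SPEC =====
def Spec_reverse_check (forward : String) (reverse : String) (out : String) : Prop := out = reverse_check_alt forward reverse
instance (forward : String) (reverse : String) (out : String) : Decidable (Spec_reverse_check forward reverse out) := by unfold Spec_reverse_check; infer_instance

-- ===== CLAIM (what is proved, stated in full; the proofs are below) =====
def Claim_equal_reverse_check : Prop := ∀ (forward : String) (reverse : String), Dom_reverse_check forward reverse → Spec_reverse_check forward reverse (reverse_check forward reverse)

-- ===== LEMMAS AND PROOFS =====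
theorem revAccA_eq (l acc : List Char) : revAccA l acc = l.reverse ++ acc := by
  induction l generalizing acc with
  | nil => simp [revAccA]
  | cons c cs ih => simp [revAccA, ih]

theorem loopB_eq (f r : List Char) (n i : Nat) :
    loopB f r n i =
      if ∀ j < n, i ≤ j → f.getD j ' ' = r.getD (n - 1 - j) ' '
      then "Good test data" else "Mismatch! Bad test data" := by
  induction hk : n - i using Nat.strong_induction_on generalizing i with
  | _ k ih =>
    unfold loopB
    by_cases hin : i < n
    · simp only [if_pos hin]
      by_cases hc : f.getD i ' ' = r.getD (n - 1 - i) ' '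
      · simp only [hc, ne_eq, not_true_eq_false, if_false]
        rw [ih (n - (i + 1)) (by omega) (i + 1) rfl]
        congr 1
        have : (∀ j < n, i + 1 ≤ j → f.getD j ' ' = r.getD (n - 1 - j) ' ') ↔
               (∀ j < n, i ≤ j → f.getD j ' ' = r.getD (n - 1 - j) ' ') := by
          constructor
          · intro h j hj hij
            rcases Nat.eq_or_lt_of_le hij with h1 | h1
            · subst h1; exact hc
            · exact h j hj h1
          · intro h j hj hij; exact h j hj (by omega)
        exact propext this
      · simp only [ne_eq, hc, not_false_eq_true, if_true]
        rw [if_neg]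
        intro h
        exact hc (h i hin le_rfl)
    · simp only [if_neg hin]
      rw [if_pos]
      intro j hj _
      omega

theorem mirror_iff (f r : List Char) (h : r.length = f.length) :
    (∀ j < f.length, 0 ≤ j → f.getD j ' ' = r.getD (f.length - 1 - j) ' ') ↔ r = f.reverse := by
  constructor
  · intro hall
    apply List.ext_getElem
    · simp [h]
    · intro k hk1 hk2
      have hk : k < f.length := by simpa [h] using hk1
      have := hall (f.length - 1 - k) (by omega) (by omega)
      rw [List.getD_eq_getElem _ _ (by omega), List.getD_eq_getElem _ _ (by omega)] at this
      have hkk : f.length - 1 - (f.length - 1 - k) = k := by omega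
      simp only [hkk] at this
      simp [List.getElem_reverse, ← this]
  · intro he
    subst he
    intro j hj _
    rw [List.getD_eq_getElem _ _ hj, List.getD_eq_getElem _ _ (by simp; omega)]
    simp [List.getElem_reverse]
    congr 1
    omega

-- ===== VERDICT (by name: the statement is the Claim_ definition above) =====
theorem reverse_check_spec : Claim_equal_reverse_check := by
  intro forward reverse _
  unfold Spec_reverse_check reverse_check reverse_check_alt
  simp only [revAccA_eq, List.append_nil]
  rw [loopB_eq]
  by_cases hlen : reverse.toList.length = forward.toList.length
  · rw [if_neg (show ¬reverse.toList.length ≠ forward.toList.length from fun h => h hlen)]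
    by_cases hrev : reverse.toList = forward.toList.reverse
    · rw [if_pos hrev, if_pos ((mirror_iff _ _ hlen).mpr hrev)]
    · rw [if_neg hrev, if_neg (fun h => hrev ((mirror_iff _ _ hlen).mp h))]
  · rw [if_neg (show ¬reverse.toList = forward.toList.reverse from
        fun h => hlen (by rw [h, List.length_reverse])),
      if_pos (show reverse.toList.length ≠ forward.toList.length from hlen)]
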